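-- pv_equiv track=rewrite | github.com/EricArcherman/GPU-PIR | gpu-pir/cpu_version/old/align.py | resolves_conflicts
-- ===== SOURCE A (Python) =====
-- def f(i, k):
--     x = k * i
--     y = (x >> 11) + x & 2047
--     z = (y >> 11) + y & 2047
--     return z
--
-- def resolves_conflicts(k):
--     conflicts = 0
--     for warp in range(4):
--         for j in range(16):
--             accesses = [False for _ in range(32)]
--             for thread in range(warp*32, (warp+1)*32):
--                 base_idx = thread*16
--                 i = f(base_idx+j, k) % 32
--                 if accesses[i]:
--                     conflicts += 1
--                 accesses[i] = True
--     return conflicts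
-- ===== SOURCE B (Python) =====
-- def f(i, k):
--     x = k * i
--     y = (x >> 11) + x & 2047
--     z = (y >> 11) + y & 2047
--     return z
--
-- def resolves_conflicts(k):
--     conflicts = 0
--     for warp in range(4):
--         for j in range(16):
--             s = sorted(f(thread * 16 + j, k) % 32 for thread in range(warp * 32, (warp + 1) * 32))
--             conflicts += sum(1 for a, b in zip(s, s[1:]) if a == b)
--     return conflicts
-- ===== Notes on version B (the rewrite author's own statement) =====
-- stated objective: alternative
-- what changed: Per (warp, j) group B sorts the group's bank indices and counts adjacent equal pairs in the sorted list (sort-then-scan), instead of A's incremental duplicate detection with a mutable boolean seen-array and a per-thread membership branch.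
import Mathlib
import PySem

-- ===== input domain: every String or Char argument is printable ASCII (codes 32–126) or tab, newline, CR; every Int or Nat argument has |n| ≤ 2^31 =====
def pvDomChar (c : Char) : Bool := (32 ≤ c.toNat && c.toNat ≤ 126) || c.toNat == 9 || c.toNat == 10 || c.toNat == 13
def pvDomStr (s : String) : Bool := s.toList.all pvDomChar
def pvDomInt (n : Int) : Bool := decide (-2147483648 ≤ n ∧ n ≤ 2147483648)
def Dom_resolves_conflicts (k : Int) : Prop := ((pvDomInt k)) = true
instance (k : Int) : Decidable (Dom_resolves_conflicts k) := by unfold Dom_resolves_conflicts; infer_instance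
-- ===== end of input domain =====

-- B replaces A's mutable boolean seen-array and per-thread duplicate branch by sort-then-scan:
-- per (warp, j) group it sorts the group's bank indices and counts adjacent equal pairs (objective: alternative).


-- ===== PORT A =====
-- helper f from the Python module (shared by both ports, exactly as in the source)
def pyf (i k : Int) : Int :=
  let x := k * i
  let y := PySem.Int.band ((x >>> 11) + x) 2047
  let z := PySem.Int.band ((y >>> 11) + y) 2047
  z

def resolves_conflicts (k : Int) : Int :=
  (PySem.List.pyRange 0 4 1).foldl (fun conflicts warp =>
    (PySem.List.pyRange 0 16 1).foldl (fun conflicts j =>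
      let accesses : List Bool := (PySem.List.pyRange 0 32 1).map (fun _ => false)
      ((PySem.List.pyRange (warp * 32) ((warp + 1) * 32) 1).foldl
        (fun (st : Int × List Bool) thread =>
          let base_idx := thread * 16
          let i := PySem.Int.mod (pyf (base_idx + j) k) 32
          (if PySem.List.pyGetD st.2 i false then st.1 + 1 else st.1,
           PySem.List.pySetD st.2 i true))
        (conflicts, accesses)).1) conflicts) 0

-- ===== PORT B =====
def resolves_conflicts_alt (k : Int) : Int :=
  (PySem.List.pyRange 0 4 1).foldl (fun conflicts warp =>
    (PySem.List.pyRange 0 16 1).foldl (fun conflicts j =>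
      let s := PySem.List.sorted
        ((PySem.List.pyRange (warp * 32) ((warp + 1) * 32) 1).map
          (fun thread => PySem.Int.mod (pyf (thread * 16 + j) k) 32))
        (fun x => x) false
      conflicts +
        (s.zip (PySem.List.slice s (some 1) none)).foldl
          (fun acc p => if p.1 = p.2 then acc + 1 else acc) (0 : Int)) conflicts) 0

-- ===== PRECONDITION & SPEC =====
def Spec_resolves_conflicts (k : Int) (out : Int) : Prop := out = resolves_conflicts_alt k
instance (k : Int) (out : Int) : Decidable (Spec_resolves_conflicts k out) := by unfold Spec_resolves_conflicts; infer_instance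

-- ===== CLAIM (what is proved, stated in full; the proofs are below) =====
def Claim_equal_resolves_conflicts : Prop := ∀ (k : Int), Dom_resolves_conflicts k → Spec_resolves_conflicts k (resolves_conflicts k)

-- ===== LEMMAS AND PROOFS =====

-- A-side loop invariant: A's mark-and-count pass over a group, started from a boolean array
-- encoding the seen-set s, adds (length of the group) minus (number of new distinct banks).
theorem group_fold (g : Int → Int) (hg : ∀ x, 0 ≤ g x ∧ g x < 32) :
    ∀ (l : List Int) (c : Int) (a : List Bool) (s : PySem.Set Int),
      a.length = 32 → s.Nodup →
      (∀ i : Int, 0 ≤ i → i < 32 → PySem.List.pyGetD a i false = PySem.Set.contains s i) →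
      (l.foldl (fun (st : Int × List Bool) thread =>
          (if PySem.List.pyGetD st.2 (g thread) false then st.1 + 1 else st.1,
           PySem.List.pySetD st.2 (g thread) true)) (c, a)).1
        = c + l.length - (((PySem.Set.update s (l.map g)).length : Int) - (s.length : Int)) := by
  intro l
  induction l with
  | nil =>
    intro c a s ha hs hrel
    simp [PySem.Set.update_nil]
  | cons x rest ih =>
    intro c a s ha hs hrel
    have hgx := hg x
    have hget : ∀ (i' : Int), 0 ≤ i' → i' < 32 →
        PySem.List.pyGetD (PySem.List.pySetD a (g x) true) i' false
          = if i' = g x then true else PySem.List.pyGetD a i' false := by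
      intro i' h0 h32
      have hx : g x = ((g x).toNat : Int) := (Int.toNat_of_nonneg hgx.1).symm
      have hi' : i' = (i'.toNat : Int) := (Int.toNat_of_nonneg h0).symm
      rw [hx, hi', PySem.List.pyGetD_pySetD_natCast a (g x).toNat i'.toNat true false (by omega)]
      by_cases h : i'.toNat = (g x).toNat
      · have h' : (i'.toNat : Int) = ((g x).toNat : Int) := by exact_mod_cast h
        rw [if_pos h, if_pos h']
      · have h' : ¬ ((i'.toNat : Int) = ((g x).toNat : Int)) := by exact_mod_cast h
        rw [if_neg h, if_neg h']
    have hlen' : (PySem.List.pySetD a (g x) true).length = 32 := by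
      rw [PySem.List.length_pySetD, ha]
    simp only [List.foldl_cons, List.map_cons, PySem.Set.update_cons, List.length_cons]
    by_cases hmem : PySem.List.pyGetD a (g x) false = true
    · have hx_in : g x ∈ s := (PySem.Set.contains_iff s (g x)).mp
        (by rw [← hrel _ hgx.1 hgx.2]; exact hmem)
      have hrel' : ∀ i : Int, 0 ≤ i → i < 32 →
          PySem.List.pyGetD (PySem.List.pySetD a (g x) true) i false = PySem.Set.contains s i := by
        intro i h0 h32
        rw [hget i h0 h32]
        by_cases hi : i = g x
        · subst hi
          rw [if_pos rfl, Eq.comm, PySem.Set.contains_iff]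
          exact hx_in
        · rw [if_neg hi]; exact hrel i h0 h32
      rw [hmem, if_pos rfl, ih (c + 1) _ s hlen' hs hrel', PySem.Set.add_of_mem hx_in]
      push_cast; ring
    · have hfalse : PySem.List.pyGetD a (g x) false = false := by
        cases h : PySem.List.pyGetD a (g x) false
        · rfl
        · exact absurd h hmem
      have hx_nin : g x ∉ s := by
        intro hmemS
        have := (PySem.Set.contains_iff s (g x)).mpr hmemS
        rw [← hrel _ hgx.1 hgx.2] at this
        exact hmem this
      have hrel'' : ∀ i : Int, 0 ≤ i → i < 32 →
          PySem.List.pyGetD (PySem.List.pySetD a (g x) true) i false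
            = PySem.Set.contains (s.add (g x)) i := by
        intro i h0 h32
        rw [hget i h0 h32]
        by_cases hi : i = g x
        · subst hi
          rw [if_pos rfl, Eq.comm, PySem.Set.contains_iff]
          exact (PySem.Set.mem_add s (g x) (g x)).mpr (Or.inr rfl)
        · rw [if_neg hi, hrel i h0 h32, Bool.eq_iff_iff,
              PySem.Set.contains_iff, PySem.Set.contains_iff, PySem.Set.mem_add]
          exact ⟨Or.inl, fun h => h.resolve_right hi⟩
      rw [hfalse, if_neg (by simp),
        ih c _ (s.add (g x)) hlen' (PySem.Set.nodup_add s (g x) hs) hrel'',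
        PySem.Set.add_of_not_mem hx_nin, List.length_append, List.length_singleton]
      push_cast; ring

theorem group_eq (g : Int → Int) (hg : ∀ x, 0 ≤ g x ∧ g x < 32)
    (l : List Int) (hl : l.length = 32) (c : Int) :
    (l.foldl (fun (st : Int × List Bool) thread =>
        (if PySem.List.pyGetD st.2 (g thread) false then st.1 + 1 else st.1,
         PySem.List.pySetD st.2 (g thread) true))
      (c, (PySem.List.pyRange 0 32 1).map (fun _ => false))).1
      = c + (32 - ((PySem.Set.ofList (l.map g)).length : Int)) := by
  rw [group_fold g hg l c _ []
    (by rw [List.length_map, PySem.List.length_pyRange_one]; rfl)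
    List.nodup_nil
    (by
      intro i h0 h32
      rw [PySem.List.pyGetD_map_pyRange_of_nonneg _ 32 i false h0 h32]
      rfl)]
  rw [show PySem.Set.update ([] : PySem.Set Int) (l.map g) = PySem.Set.ofList (l.map g) from
    PySem.Set.update_empty (l.map g), hl]
  simp only [List.length_nil]
  push_cast; ring

-- distinct-count of a list as a Finset cardinality
theorem ofList_length_eq_card (l : List Int) :
    (PySem.Set.ofList l).length = l.toFinset.card := by
  have hnd := PySem.Set.nodup_ofList l
  have hfin : (PySem.Set.ofList l).toFinset = l.toFinset := by
    ext x
    simp [List.mem_toFinset, PySem.Set.mem_ofList]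
  rw [← hfin, List.toFinset_card_of_nodup hnd]

-- B-side core identity: in a (≤)-sorted list, the number of adjacent equal pairs
-- equals the length minus the number of distinct values.
theorem adj_eq_sorted : ∀ (s : List Int), s.Pairwise (· ≤ ·) →
    ((s.zip s.tail).countP (fun p => decide (p.1 = p.2)) : Int)
      = (s.length : Int) - (s.toFinset.card : Int) := by
  intro s
  induction s with
  | nil => intro _; simp
  | cons x t ih =>
    intro hp
    cases t with
    | nil => simp
    | cons y r =>
      have hp' : (y :: r).Pairwise (· ≤ ·) := hp.tail
      have hxy : x ≤ y := (List.pairwise_cons.mp hp).1 y (by simp)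
      have hIH := ih hp'
      simp only [List.tail_cons] at hIH
      by_cases hxeqy : x = y
      · subst hxeqy
        have hfin : (x :: x :: r).toFinset = (x :: r).toFinset := by
          simp [List.toFinset_cons]
        simp only [List.tail_cons, List.zip_cons_cons, List.countP_cons, hfin, List.length_cons]
        have h1 : (if decide True = true then 1 else 0) = 1 := rfl
        rw [h1]
        push_cast [List.length_cons]
        push_cast [List.length_cons] at hIH
        linarith [hIH]
      · have hxnin : x ∉ (y :: r) := by
          intro hmem
          rcases List.mem_cons.mp hmem with h | h
          · exact hxeqy h
          · have hyz : y ≤ x := (List.pairwise_cons.mp hp').1 x h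
            exact hxeqy (le_antisymm hxy hyz)
        have hfin : (x :: y :: r).toFinset.card = (y :: r).toFinset.card + 1 := by
          rw [List.toFinset_cons, Finset.card_insert_of_notMem (by
            simpa [List.mem_toFinset] using hxnin)]
        simp only [List.tail_cons, List.zip_cons_cons, List.countP_cons, List.length_cons, hfin]
        have h0 : (if decide (x = y) = true then 1 else 0) = 0 := by simp [hxeqy]
        rw [h0]
        push_cast [List.length_cons]
        push_cast [List.length_cons] at hIH
        linarith [hIH]

-- ===== VERDICT (by name: the statement is the Claim_ definition above) =====
theorem resolves_conflicts_spec : Claim_equal_resolves_conflicts := by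
  intro k _
  unfold Spec_resolves_conflicts resolves_conflicts resolves_conflicts_alt
  apply PySem.List.foldl_congr_mem
  intro acc warp _
  apply PySem.List.foldl_congr_mem
  intro acc2 j _
  have hg : ∀ x : Int, 0 ≤ PySem.Int.mod (pyf (x * 16 + j) k) 32 ∧
      PySem.Int.mod (pyf (x * 16 + j) k) 32 < 32 :=
    fun x => ⟨PySem.Int.mod_nonneg _ (by norm_num), PySem.Int.mod_lt _ (by norm_num)⟩
  have hl : (PySem.List.pyRange (warp * 32) ((warp + 1) * 32) 1).length = 32 := by
    rw [PySem.List.length_pyRange_one]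
    have h : (warp + 1) * 32 - warp * 32 = 32 := by ring
    rw [h]; rfl
  set m := (PySem.List.pyRange (warp * 32) ((warp + 1) * 32) 1).map
    (fun thread => PySem.Int.mod (pyf (thread * 16 + j) k) 32) with hm
  have hml : m.length = 32 := by rw [hm, List.length_map, hl]
  rw [group_eq (fun thread => PySem.Int.mod (pyf (thread * 16 + j) k) 32) hg _ hl acc2]
  have hperm : (PySem.List.sorted m (fun x => x) false).Perm m :=
    PySem.List.sorted_perm m (fun x => x) false
  have hpw : (PySem.List.sorted m (fun x => x) false).Pairwise (· ≤ ·) := by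
    simpa using PySem.List.sorted_pairwise m (fun x => x)
  have hadj := adj_eq_sorted (PySem.List.sorted m (fun x => x) false) hpw
  have hc : (PySem.List.sorted m (fun x => x) false).toFinset = m.toFinset :=
    List.toFinset_eq_of_perm _ _ hperm
  simp only [PySem.List.slice_from_one, PySem.List.foldl_ite_add_one, hadj,
    hperm.length_eq, hml, hc, ofList_length_eq_card]
  rw [hm, show (warp + 1) * 32 = 32 + warp * 32 from by ring]
  push_cast
  ring
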